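-- pv_equiv track=rewrite | github.com/beatrice-b-m/HITI_anon_internal | HITI_anon_internal/TextAnon.py | new_slice
-- ===== SOURCE A (Python) =====
-- def new_slice(s, symbols):
-- 	sliced = []
-- 	characters = []
-- 	i = 0
-- 	for j in range(len(s)):
-- 		if s[j] in symbols:
-- 			sliced.append(s[i:j])
-- 			characters.append(s[j])
-- 			i = j + 1
-- 	sliced.append(s[i:])
-- 	return sliced, characters
-- ===== SOURCE B (Python) =====
-- import re
--
-- def new_slice(s, symbols):
--     if not symbols:
--         return [s], []
--     pat = '[' + re.escape(symbols) + ']'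
--     characters = re.findall(pat, s)
--     sliced = re.split(pat, s)
--     return sliced, characters
-- ===== Notes on version B (the rewrite author's own statement) =====
-- stated objective: idiomatic
-- what changed: Replaced A's index-pointer scan that slices s[i:j] with two regex passes: re.split on a character class for the pieces and re.findall on the same class for the symbols.
import Mathlib
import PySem

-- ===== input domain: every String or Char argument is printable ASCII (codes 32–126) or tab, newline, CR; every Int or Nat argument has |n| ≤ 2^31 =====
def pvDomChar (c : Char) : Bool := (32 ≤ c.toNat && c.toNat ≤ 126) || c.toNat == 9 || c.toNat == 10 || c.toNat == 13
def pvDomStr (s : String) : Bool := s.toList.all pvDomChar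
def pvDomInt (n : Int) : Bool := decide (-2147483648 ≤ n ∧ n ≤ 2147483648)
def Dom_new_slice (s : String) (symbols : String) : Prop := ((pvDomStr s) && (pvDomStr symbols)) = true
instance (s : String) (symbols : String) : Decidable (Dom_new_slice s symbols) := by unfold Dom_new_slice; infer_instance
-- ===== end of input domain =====

-- B replaces A's single index-pointer scan (pending-start i, slice s[i:j] at each symbol)
-- by two regex passes on a character class: re.split for the pieces, re.findall for the
-- symbols (objective: idiomatic; same O(n) cost).

-- ===== PORT A =====
-- loop body of A: state (sliced, characters, i), index j from range(len(s)).
-- 's[j] in symbols': s[j] is a one-character string, so Python's substring test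
-- is exactly character membership in symbols — ported as such (exact).
def nsStepA (cs syms : List Char) (acc : List String × List String × Int) (j : Int) :
    List String × List String × Int :=
  match acc with
  | (sliced, characters, i) =>
    let cj := PySem.List.pyGetD cs j ' '
    if cj ∈ syms then
      (sliced ++ [String.ofList (PySem.List.slice cs (some i) (some j))],
       characters ++ [String.ofList [cj]], j + 1)
    else (sliced, characters, i)

def new_slice (s : String) (symbols : String) : List String × List String :=
  let cs := s.toList
  let res := (PySem.List.pyRange 0 (PySem.Str.len s) 1).foldl (nsStepA cs symbols.toList) ([], [], 0)
  (res.1 ++ [String.ofList (PySem.List.slice cs (some res.2.2) none)], res.2.1)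

-- ===== PORT B =====
-- hand port of re.split(pat, s) for pat = '[' + re.escape(symbols) + ']': a single-character
-- class matches exactly the characters that are members of symbols, so re.split repeatedly
-- finds the next such character, emits the piece before it, and continues after it
-- (exact for this pattern; re.escape only changes the pattern text, not the matched set).
def reSplitClass (syms : List Char) (cs : List Char) : List String :=
  match h : cs.findIdx? (· ∈ syms) with
  | none => [String.ofList cs]
  | some j => String.ofList (cs.take j) :: reSplitClass syms (cs.drop (j + 1))
termination_by cs.length
decreasing_by
  have hne : cs ≠ [] := by intro hnil; rw [hnil] at h; simp at h
  have : 0 < cs.length := List.length_pos_iff.mpr hne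
  simp [List.length_drop]; omega

-- hand port of re.findall(pat, s) for the same single-character class: every match is one
-- character of s that is a member of symbols, returned in order as a one-character string
-- (exact for this pattern).
def reFindallClass (syms : List Char) (cs : List Char) : List String :=
  (cs.filter (· ∈ syms)).map (fun c => String.ofList [c])

def new_slice_alt (s : String) (symbols : String) : List String × List String :=
  if symbols.toList.isEmpty then ([s], [])
  else
    let characters := reFindallClass symbols.toList s.toList
    let sliced := reSplitClass symbols.toList s.toList
    (sliced, characters)

-- ===== PRECONDITION & SPEC =====
def Spec_new_slice (s : String) (symbols : String) (out : List String × List String) : Prop := out = new_slice_alt s symbols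
instance (s : String) (symbols : String) (out : List String × List String) : Decidable (Spec_new_slice s symbols out) := by unfold Spec_new_slice; infer_instance

-- ===== CLAIM (what is proved, stated in full; the proofs are below) =====
def Claim_equal_new_slice : Prop := ∀ (s : String) (symbols : String), Dom_new_slice s symbols → Spec_new_slice s symbols (new_slice s symbols)

-- ===== LEMMAS AND PROOFS =====

-- Proof-only intermediate: A's loop re-stated as a character fold buffering the current piece.
def nsStepM (syms : List Char) (acc : List String × List String × List Char) (ch : Char) :
    List String × List String × List Char :=
  match acc with
  | (sliced, characters, cur) =>
    if ch ∈ syms then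
      (sliced ++ [String.ofList cur], characters ++ [String.ofList [ch]], [])
    else (sliced, characters, cur ++ [ch])

-- A's range-indexed fold equals the character fold (prefix-generalised).
lemma ns_main (syms : List Char) :
    ∀ (t pre : List Char) (sl ch : List String) (i : Nat), i ≤ pre.length →
    (let cs := pre ++ t
     let res := (PySem.List.pyRange (pre.length : Int) (cs.length : Int) 1).foldl
                  (nsStepA cs syms) (sl, ch, (i : Int))
     (res.1 ++ [String.ofList (PySem.List.slice cs (some res.2.2) none)], res.2.1))
    =
    (let res := t.foldl (nsStepM syms) (sl, ch, pre.drop i)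
     (res.1 ++ [String.ofList res.2.2], res.2.1)) := by
  intro t
  induction t with
  | nil =>
    intro pre sl ch i hi
    simp [PySem.List.pyRange_one_eq_nil, PySem.List.slice_from _ (Int.natCast_nonneg i)]
  | cons c t' ih =>
    intro pre sl ch i hi
    have hlt : (pre.length : Int) < ((pre ++ c :: t').length : Int) := by
      simp
    have hcons := PySem.List.pyRange_one_cons hlt
    have hget : PySem.List.pyGetD (pre ++ c :: t') (pre.length : Int) ' ' = c := by
      rw [PySem.List.pyGetD_natCast]
      simp [List.getD]
    have hslice : PySem.List.slice (pre ++ c :: t') (some (i : Int)) (some (pre.length : Int))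
        = pre.drop i := by
      rw [PySem.List.slice_toNat _ (Int.natCast_nonneg i) (Int.natCast_nonneg pre.length)]
      simp only [Int.toNat_natCast]
      rw [List.drop_append_of_le_length (by omega)]
      rw [List.take_append_of_le_length (by simp)]
      simp
    have hre : pre ++ c :: t' = (pre ++ [c]) ++ t' := by simp
    simp only [hcons, List.foldl_cons, nsStepA, nsStepM, hget, hslice]
    by_cases hc : c ∈ syms
    · simp only [hc, if_pos]
      have := ih (pre ++ [c]) (sl ++ [String.ofList (pre.drop i)]) (ch ++ [String.ofList [c]])
        (pre.length + 1) (by simp)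
      simp only [List.append_assoc] at this ⊢
      rw [hre]
      have hcast : (pre.length : Int) + 1 = (((pre ++ [c]).length : Nat) : Int) := by
        simp
      rw [hcast]
      have hlen : ((pre ++ [c]).length : Nat) = pre.length + 1 := by simp
      simpa [hlen] using this
    · simp only [hc]
      have := ih (pre ++ [c]) sl ch i (by simp; omega)
      rw [hre]
      have hdrop : (pre ++ [c]).drop i = pre.drop i ++ [c] := by
        rw [List.drop_append_of_le_length (by omega)]
      have hlen : (((pre ++ [c]).length : Nat) : Int) = (pre.length : Int) + 1 := by simp
      rw [hlen, hdrop] at this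
      simpa using this

-- structural recursion equations for reSplitClass
lemma reSplit_nil (syms : List Char) : reSplitClass syms [] = [String.ofList []] := by
  rw [reSplitClass]; simp

lemma reSplit_cons_mem (syms : List Char) (c : Char) (t : List Char) (hc : c ∈ syms) :
    reSplitClass syms (c :: t) = String.ofList [] :: reSplitClass syms t := by
  have hf : (c :: t).findIdx? (· ∈ syms) = some 0 := by
    simp [List.findIdx?_cons, hc]
  rw [reSplitClass]
  split
  · rename_i h; rw [hf] at h; cases h
  · rename_i j h; rw [hf] at h
    injection h with h
    subst h
    simp

lemma reSplit_ne_nil (syms cs : List Char) : reSplitClass syms cs ≠ [] := by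
  rw [reSplitClass]
  cases h : cs.findIdx? (· ∈ syms) <;> simp

lemma reSplit_cons_not_mem (syms : List Char) (c : Char) (t : List Char) (hc : c ∉ syms) :
    reSplitClass syms (c :: t) =
      match reSplitClass syms t with
      | [] => [String.ofList [c]]
      | h :: r => String.ofList (c :: h.toList) :: r := by
  have hdec : decide (c ∈ syms) = false := by simpa using hc
  cases h : t.findIdx? (· ∈ syms) with
  | none =>
    have hfc : (c :: t).findIdx? (· ∈ syms) = none := by
      simp [List.findIdx?_cons, hdec, h]
    have h1 : reSplitClass syms (c :: t) = [String.ofList (c :: t)] := by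
      rw [reSplitClass]
      split
      · rfl
      · rename_i j h2; rw [hfc] at h2; cases h2
    have h2 : reSplitClass syms t = [String.ofList t] := by
      rw [reSplitClass]
      split
      · rfl
      · rename_i j h3; rw [h] at h3; cases h3
    rw [h1, h2]
    simp
  | some j =>
    have hfc : (c :: t).findIdx? (· ∈ syms) = some (j + 1) := by
      simp [List.findIdx?_cons, hdec, h]
    have h1 : reSplitClass syms (c :: t)
        = String.ofList ((c :: t).take (j + 1)) :: reSplitClass syms ((c :: t).drop (j + 1 + 1)) := by
      rw [reSplitClass]
      split
      · rename_i h2; rw [hfc] at h2; cases h2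
      · rename_i k h2; rw [hfc] at h2; injection h2 with h2; subst h2; rfl
    have h2 : reSplitClass syms t
        = String.ofList (t.take j) :: reSplitClass syms (t.drop (j + 1)) := by
      rw [reSplitClass]
      split
      · rename_i h3; rw [h] at h3; cases h3
      · rename_i k h3; rw [h] at h3; injection h3 with h3; subst h3; rfl
    rw [h1, h2]
    simp

-- prepend a pending buffer onto the first piece
def prependHead (cur : List Char) (l : List String) : List String :=
  match l with
  | [] => [String.ofList cur]
  | h :: r => String.ofList (cur ++ h.toList) :: r

-- the character fold, finalised, equals the regex-pass pair
lemma ns_fold_eq_regex (syms : List Char) :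
    ∀ (cs : List Char) (sl ch : List String) (cur : List Char),
    (let res := cs.foldl (nsStepM syms) (sl, ch, cur)
     (res.1 ++ [String.ofList res.2.2], res.2.1))
    = (sl ++ prependHead cur (reSplitClass syms cs), ch ++ reFindallClass syms cs) := by
  intro cs
  induction cs with
  | nil =>
    intro sl ch cur
    simp [reSplit_nil, prependHead, reFindallClass]
  | cons c t ih =>
    intro sl ch cur
    by_cases hc : c ∈ syms
    · simp only [List.foldl_cons, nsStepM, hc, if_pos]
      rw [ih]
      rw [reSplit_cons_mem syms c t hc]
      have hpre : prependHead [] (reSplitClass syms t) = reSplitClass syms t := by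
        cases h : reSplitClass syms t with
        | nil => exact absurd h (reSplit_ne_nil syms t)
        | cons a r => simp [prependHead]
      rw [hpre]
      simp [prependHead, reFindallClass, hc]
    · simp only [List.foldl_cons, nsStepM, hc, if_neg, not_false_iff]
      rw [ih]
      rw [reSplit_cons_not_mem syms c t hc]
      cases h : reSplitClass syms t with
      | nil => exact absurd h (reSplit_ne_nil syms t)
      | cons a r =>
        simp [prependHead, reFindallClass, hc]

-- ===== VERDICT (by name: the statement is the Claim_ definition above) =====
theorem new_slice_spec : Claim_equal_new_slice := by
  intro s symbols _
  unfold Spec_new_slice new_slice new_slice_alt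
  have h := ns_main symbols.toList s.toList [] [] [] 0 (by simp)
  simp only [List.nil_append, List.length_nil, Nat.cast_zero, List.drop_zero] at h
  have h2 := ns_fold_eq_regex symbols.toList s.toList [] [] []
  by_cases hemp : symbols.toList.isEmpty
  · have hsyms : symbols.toList = [] := by simpa [List.isEmpty_iff] using hemp
    simp only [hemp, if_pos]
    have hsplit : reSplitClass symbols.toList s.toList = [String.ofList s.toList] := by
      have hnone : s.toList.findIdx? (· ∈ symbols.toList) = none := by
        simp [List.findIdx?_eq_none_iff, hsyms]
      rw [reSplitClass]
      split
      · rfl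
      · rename_i j h3; rw [hnone] at h3; cases h3
    simp only [hsplit, prependHead, List.nil_append] at h2
    have hfind : reFindallClass symbols.toList s.toList = [] := by
      simp [reFindallClass, hsyms]
    rw [hfind] at h2
    simpa [PySem.Str.len_eq, h2] using h
  · simp only [hemp]
    have hpre : prependHead [] (reSplitClass symbols.toList s.toList)
        = reSplitClass symbols.toList s.toList := by
      cases h3 : reSplitClass symbols.toList s.toList with
      | nil => exact absurd h3 (reSplit_ne_nil _ _)
      | cons a r => simp [prependHead]
    rw [hpre] at h2
    simp only [List.nil_append] at h2
    simpa [PySem.Str.len_eq, h2] using h
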